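-- pv_equiv track=rewrite | github.com/maurofaccin/DataCovHCQ | covhcq-code/run_african_tagtensor.py | __monthlist__
-- ===== SOURCE A (Python) =====
-- def __monthlist__(typename) -> list:
--     if "early" in typename:
--         months = [f"2020-{x + 1:02d}" for x in range(7)]
--         # months = [f"2020-{x + 1:02d}" for x in range(1)]
--     elif "late" in typename:
--         months = [f"2020-{x + 1:02d}" for x in range(7, 12)] + [
--             f"2021-{x + 1:02d}" for x in range(9)
--         ]
--     else:
--         months = [f"2020-{x + 1:02d}" for x in range(12)] + [f"2021-{x + 1:02d}" for x in range(9)]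
--
--     return months
-- ===== SOURCE B (Python) =====
-- def __monthlist__(typename) -> list:
--     if "early" in typename:
--         start, last = (2020, 1), (2020, 7)
--     elif "late" in typename:
--         start, last = (2020, 8), (2021, 9)
--     else:
--         start, last = (2020, 1), (2021, 9)
--     y, m = start
--     out = []
--     while (y, m) <= last:
--         out.append(f"{y}-{m:02d}")
--         if m == 12:
--             y, m = y + 1, 1
--         else:
--             m += 1
--     return out
-- ===== Notes on version B (the rewrite author's own statement) =====
-- stated objective: alternative
-- what changed: B walks a (year, month) calendar successor loop from a branch-dependent start date to an end date, incrementing the month with December-to-January rollover, instead of concatenating hardcoded range comprehensions per branch.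
import Mathlib
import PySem

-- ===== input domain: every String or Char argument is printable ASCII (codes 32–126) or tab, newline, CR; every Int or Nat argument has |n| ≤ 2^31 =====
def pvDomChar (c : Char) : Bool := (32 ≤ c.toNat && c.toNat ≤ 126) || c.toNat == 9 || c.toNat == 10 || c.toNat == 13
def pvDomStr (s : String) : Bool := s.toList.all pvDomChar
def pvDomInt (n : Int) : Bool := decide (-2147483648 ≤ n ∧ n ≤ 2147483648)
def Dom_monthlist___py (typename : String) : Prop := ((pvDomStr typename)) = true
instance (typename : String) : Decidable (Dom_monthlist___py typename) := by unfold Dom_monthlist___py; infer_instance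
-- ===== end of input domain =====

-- B replaces per-branch range comprehensions with a calendar successor loop (alternative decomposition); return-value equivalence.

-- ===== PORT A =====
-- f"2020-{x + 1:02d}": year literal, '-', month zero-padded to width 2
def monthlist___py (typename : String) : List String :=
  if PySem.Str.isIn "early" typename then
    (PySem.List.pyRange 0 7 1).map (fun x => "2020-" ++ PySem.Str.zfill (PySem.Int.toStr (x + 1)) 2)
  else if PySem.Str.isIn "late" typename then
    (PySem.List.pyRange 7 12 1).map (fun x => "2020-" ++ PySem.Str.zfill (PySem.Int.toStr (x + 1)) 2)
      ++ (PySem.List.pyRange 0 9 1).map (fun x => "2021-" ++ PySem.Str.zfill (PySem.Int.toStr (x + 1)) 2)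
  else
    (PySem.List.pyRange 0 12 1).map (fun x => "2020-" ++ PySem.Str.zfill (PySem.Int.toStr (x + 1)) 2)
      ++ (PySem.List.pyRange 0 9 1).map (fun x => "2021-" ++ PySem.Str.zfill (PySem.Int.toStr (x + 1)) 2)

-- ===== PORT B =====
-- the while loop of Source B: fuel only makes the recursion total (the loop runs at most 21 times)
def monthsBetween (fuel : Nat) (y m ly lm : Int) : List String :=
  match fuel with
  | 0 => []
  | fuel + 1 =>
    if y < ly ∨ (y = ly ∧ m ≤ lm) then  -- Python tuple comparison (y, m) <= (ly, lm)
      (PySem.Int.toStr y ++ "-" ++ PySem.Str.zfill (PySem.Int.toStr m) 2)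
        :: (if m == 12 then monthsBetween fuel (y + 1) 1 ly lm
            else monthsBetween fuel y (m + 1) ly lm)
    else []

def monthlist___py_alt (typename : String) : List String :=
  let span : (Int × Int) × (Int × Int) :=
    if PySem.Str.isIn "early" typename then ((2020, 1), (2020, 7))
    else if PySem.Str.isIn "late" typename then ((2020, 8), (2021, 9))
    else ((2020, 1), (2021, 9))
  monthsBetween 22 span.1.1 span.1.2 span.2.1 span.2.2

-- ===== PRECONDITION & SPEC =====
def Spec_monthlist___py (typename : String) (out : List String) : Prop := out = monthlist___py_alt typename
instance (typename : String) (out : List String) : Decidable (Spec_monthlist___py typename out) := by unfold Spec_monthlist___py; infer_instance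

-- ===== CLAIM (what is proved, stated in full; the proofs are below) =====
def Claim_equal_monthlist___py : Prop := ∀ (typename : String), Dom_monthlist___py typename → Spec_monthlist___py typename (monthlist___py typename)

-- ===== LEMMAS AND PROOFS =====

-- ===== VERDICT (by name: the statement is the Claim_ definition above) =====
theorem monthlist___py_spec : Claim_equal_monthlist___py := by
  intro typename _
  unfold Spec_monthlist___py monthlist___py monthlist___py_alt
  split_ifs <;> decide
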